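-- pv_equiv track=rewrite | github.com/kevlli/Advent-of-Code-2023 | day7/day7.py | insertList
-- ===== SOURCE A (Python) =====
-- def compareHands(h1, h2):
--     order = ['A', 'K', 'Q', 'J', 'T', '9', '8', '7', '6', '5', '4', '3', '2']
--     for i in range(len(h1)):
--         index1 = order.index(h1[i])
--         index2 = order.index(h2[i])
--         if (index1 == index2):
--             continue
--         if (index1 < index2):
--             return 1
--         if (index1 > index2):
--             return 0
--
-- def insertList(list, tup):
--
--     cards = tup[0]
--     if not list:
--         list.insert(0, tup)
--         return list
--     for i, hands in enumerate(list):
--         if compareHands(cards, hands[0]):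
--             list.insert(i, tup)
--             return list
--     list.insert(len(list), tup)
--     return list
-- ===== SOURCE B (Python) =====
-- # Binary search (hand-written bisect_right over precomputed rank keys) instead of A's linear
-- # scan with per-character order.index comparisons; same in-place insert and same returned object.
-- def insertList(list, tup):
--     rank = {c: i for i, c in enumerate('AKQJT98765432')}
--     keys = [[rank[c] for c in hand] for hand, _ in list]
--     x = [rank[c] for c in tup[0]]
--     lo, hi = 0, len(list)
--     while lo < hi:
--         mid = (lo + hi) // 2
--         if x < keys[mid]:
--             hi = mid
--         else:
--             lo = mid + 1
--     list.insert(lo, tup)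
--     return list
-- ===== Notes on version B (the rewrite author's own statement) =====
-- stated objective: alternative
-- what changed: B precomputes integer rank-key lists for all hands once and finds the insertion index by a hand-written bisect_right binary search over those keys, instead of A's linear scan that compares per character with repeated order.index lookups; exact because Pre_ keeps the list ordered enough that the hands the new hand beats form a suffix (the invariant this insertion maintains), where the bisect_right position is exactly the first beaten hand.
-- outside the precondition, e.g. on insertList([('A2', 1)], ('A', 0)): A returns [('A2', 1), ('A', 0)], B returns [('A', 0), ('A2', 1)]; on insertList([('2X', 1)], ('A4', 0)): A returns [('A4', 0), ('2X', 1)], B raises KeyError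
import Mathlib
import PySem

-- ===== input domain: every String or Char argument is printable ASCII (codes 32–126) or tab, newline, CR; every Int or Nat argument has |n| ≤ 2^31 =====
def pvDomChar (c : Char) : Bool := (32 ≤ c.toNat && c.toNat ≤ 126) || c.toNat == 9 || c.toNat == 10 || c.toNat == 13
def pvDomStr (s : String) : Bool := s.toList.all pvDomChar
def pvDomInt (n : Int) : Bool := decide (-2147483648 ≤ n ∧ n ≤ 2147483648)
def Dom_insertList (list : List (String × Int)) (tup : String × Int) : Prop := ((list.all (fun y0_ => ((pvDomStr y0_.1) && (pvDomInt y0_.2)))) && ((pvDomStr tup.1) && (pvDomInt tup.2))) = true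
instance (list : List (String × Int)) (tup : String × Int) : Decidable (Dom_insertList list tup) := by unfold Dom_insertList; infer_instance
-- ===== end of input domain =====

-- B replaces A's linear scan with per-character order.index comparisons by precomputed integer
-- rank keys and a hand-written bisect_right binary search over them (objective: alternative).
-- Both Pythons mutate `list` in place and return the same object; only the return value is
-- proved equivalent here.

-- ===== PORT A =====
def pvOrder : List Char := ['A', 'K', 'Q', 'J', 'T', '9', '8', '7', '6', '5', '4', '3', '2']

-- loop `for i in range(len(h1))` of compareHands; order.index raises ValueError on a char not in
-- pvOrder and h2[i] raises IndexError when h2 is shorter — both modeled by getD defaults, which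
-- Pre_insertList keeps unreachable (exact on Pre_).
def compareHandsAux (h1 h2 : List Char) (i : Nat) : Option Int :=
  if h : i < h1.length then
    let index1 : Nat := (PySem.List.index? pvOrder h1[i]).getD 0
    let index2 : Nat := (PySem.List.index? pvOrder ((PySem.List.pyGet? h2 (i : Int)).getD ' ')).getD 0
    if index1 = index2 then compareHandsAux h1 h2 (i + 1)
    else if index1 < index2 then some 1
    else some 0
  else none
termination_by h1.length - i

def compareHands (h1 h2 : String) : Option Int := compareHandsAux h1.toList h2.toList 0

-- the `for i, hands in enumerate(list)` scan of insertList (truthiness of compareHands's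
-- Optional[int]: some 1 is truthy, some 0 and none are falsy)
def insertLoopA (cards : String) (tup : String × Int) : List (String × Int) → List (String × Int)
  | [] => [tup]
  | h :: t =>
    if (compareHands cards h.1).getD 0 ≠ 0 then tup :: h :: t
    else h :: insertLoopA cards tup t

def insertList (list : List (String × Int)) (tup : String × Int) : List (String × Int) :=
  let cards := tup.1
  if list.isEmpty then tup :: list
  else insertLoopA cards tup list

-- ===== PORT B =====
-- rank = {c: i for i, c in enumerate('AKQJT98765432')}
def pvRank : PySem.Dict Char Int :=
  (PySem.List.enumerate "AKQJT98765432".toList 0).foldl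
    (fun d p => d.insert p.2 p.1) PySem.Dict.empty

-- [rank[c] for c in hand]; rank[c] raises KeyError off the 13 card chars, modeled by getD 0,
-- unreachable under Pre_insertList
def keyB (hand : String) : List Int := hand.toList.map (fun c => (pvRank.get? c).getD 0)

-- Python's `<` on lists of ints (lexicographic, shorter prefix smaller)
def pyListLt : List Int → List Int → Bool
  | _, [] => false
  | [], _ :: _ => true
  | a :: as, b :: bs => if a < b then true else if b < a then false else pyListLt as bs

-- the `while lo < hi` binary-search loop; `(lo+hi)//2` on nonnegative ints = Nat division;
-- keys[mid] is always in range while lo < hi ≤ len (getD [] never fires)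
def bisectAux (keys : List (List Int)) (x : List Int) (lo hi : Nat) : Nat :=
  if _h : lo < hi then
    let mid := (lo + hi) / 2
    if pyListLt x ((keys[mid]?).getD []) then bisectAux keys x lo mid
    else bisectAux keys x (mid + 1) hi
  else lo
termination_by hi - lo
decreasing_by all_goals omega

def insertList_alt (list : List (String × Int)) (tup : String × Int) : List (String × Int) :=
  let keys := list.map (fun p => keyB p.1)
  let x := keyB tup.1
  let lo := bisectAux keys x 0 list.length
  PySem.List.insert list (Int.ofNat lo) tup

-- ===== PRECONDITION & SPEC =====
-- spec-side hand comparison, independent of both ports: does hand c strictly beat hand h?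
def rankOf (c : Char) : Nat := List.idxOf c "AKQJT98765432".toList
def beatsL : List Char → List Char → Bool
  | a :: as, b :: bs =>
    if rankOf a < rankOf b then true else if rankOf b < rankOf a then false else beatsL as bs
  | _, _ => false
def handBeats (c h : String) : Bool := beatsL c.toList h.toList

-- Pre_ restricts to the function's natural domain: every hand (the new one and those in the
-- list) uses only the 13 card characters, all hands have the same length, and the hands the new
-- hand beats form a suffix of the list (true whenever the list is kept in hand order, the
-- invariant this insertion function maintains). Outside it A may raise ValueError/IndexError,
-- or returns a position that is an artefact of its linear scan (first beaten element of an
-- out-of-order list, or a decision made on a prefix of unequal-length hands), while B's binary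
-- search picks another defensible position or raises KeyError.
def Pre_insertList (list : List (String × Int)) (tup : String × Int) : Prop :=
  tup.1.toList.all (fun c => pvOrder.contains c) = true ∧
  (∀ p ∈ list, p.1.toList.length = tup.1.toList.length ∧
    p.1.toList.all (fun c => pvOrder.contains c) = true) ∧
  List.Pairwise (fun a b => handBeats tup.1 a.1 = true → handBeats tup.1 b.1 = true) list
instance (list : List (String × Int)) (tup : String × Int) : Decidable (Pre_insertList list tup) := by
  unfold Pre_insertList; infer_instance

def pvWitness_insertList : (List (String × Int)) × (String × Int) :=
  ([("AAA", 1), ("KK2", 2), ("234", 7)], ("AQJ", 0))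

def Spec_insertList (list : List (String × Int)) (tup : String × Int) (out : List (String × Int)) : Prop := out = insertList_alt list tup
instance (list : List (String × Int)) (tup : String × Int) (out : List (String × Int)) : Decidable (Spec_insertList list tup out) := by unfold Spec_insertList; infer_instance

-- ===== CLAIM (what is proved, stated in full; the proofs are below) =====
def Claim_equal_insertList : Prop := ∀ (list : List (String × Int)) (tup : String × Int), Dom_insertList list tup → Pre_insertList list tup → Spec_insertList list tup (insertList list tup)

-- ===== LEMMAS AND PROOFS =====

-- proof-side structural version of A's comparison loop
def cmpL : List Char → List Char → Option Int
  | a :: as, b :: bs =>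
    let i1 : Nat := (PySem.List.index? pvOrder a).getD 0
    let i2 : Nat := (PySem.List.index? pvOrder b).getD 0
    if i1 = i2 then cmpL as bs else if i1 < i2 then some 1 else some 0
  | _, _ => none

lemma compareHandsAux_eq_cmpL (l1 l2 : List Char) (hlen : l2.length = l1.length) :
    ∀ i, compareHandsAux l1 l2 i = cmpL (l1.drop i) (l2.drop i) := by
  have main : ∀ n i, l1.length - i = n →
      compareHandsAux l1 l2 i = cmpL (l1.drop i) (l2.drop i) := by
    intro n
    induction n with
    | zero =>
      intro i hi
      have h1 : ¬ i < l1.length := by omega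
      rw [compareHandsAux]
      simp only [h1, dite_false]
      rw [List.drop_eq_nil_of_le (by omega), List.drop_eq_nil_of_le (by omega)]
      rfl
    | succ n ih =>
      intro i hi
      have hlt : i < l1.length := by omega
      have hlt2 : i < l2.length := by omega
      rw [compareHandsAux]
      simp only [hlt, dite_true]
      have hd1 : l1.drop i = l1[i] :: l1.drop (i + 1) := List.drop_eq_getElem_cons hlt
      have hd2 : l2.drop i = l2[i] :: l2.drop (i + 1) := List.drop_eq_getElem_cons hlt2
      have hget : PySem.List.pyGet? l2 (i : Int) = some l2[i] := by
        rw [PySem.List.pyGet?_natCast]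
        exact List.getElem?_eq_getElem hlt2
      rw [hd1, hd2, cmpL, hget]
      simp only [Option.getD_some]
      split_ifs with h h'
      · exact ih (i + 1) (by omega)
      · rfl
      · rfl
  intro i; exact main (l1.length - i) i rfl

lemma kf_eq (c : Char) (hc : c ∈ pvOrder) :
    (pvRank.get? c).getD 0 = (((PySem.List.index? pvOrder c).getD 0 : Nat) : Int) := by
  fin_cases hc <;> decide

lemma cmpL_eq_pyListLt (l1 l2 : List Char) (hlen : l2.length = l1.length)
    (h1 : ∀ c ∈ l1, c ∈ pvOrder) (h2 : ∀ c ∈ l2, c ∈ pvOrder) :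
    ((cmpL l1 l2).getD 0 ≠ 0) ↔
      pyListLt (l1.map (fun c => (pvRank.get? c).getD 0))
               (l2.map (fun c => (pvRank.get? c).getD 0)) = true := by
  induction l1 generalizing l2 with
  | nil =>
    cases l2 with
    | nil => simp [cmpL, pyListLt]
    | cons b bs => simp at hlen
  | cons a as ih =>
    cases l2 with
    | nil => simp at hlen
    | cons b bs =>
      have ha : a ∈ pvOrder := h1 a (by simp)
      have hb : b ∈ pvOrder := h2 b (by simp)
      have hka := kf_eq a ha
      have hkb := kf_eq b hb
      rw [List.map_cons, List.map_cons, cmpL, pyListLt, hka, hkb]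
      by_cases he : (PySem.List.index? pvOrder a).getD 0 = (PySem.List.index? pvOrder b).getD 0
      · rw [if_pos he, he, if_neg (lt_irrefl _), if_neg (lt_irrefl _)]
        exact ih bs (by simpa using hlen) (fun c hc => h1 c (by simp [hc]))
          (fun c hc => h2 c (by simp [hc]))
      · by_cases hl : (PySem.List.index? pvOrder a).getD 0 < (PySem.List.index? pvOrder b).getD 0
        · rw [if_neg he, if_pos hl, if_pos (by exact_mod_cast hl)]
          simp
        · have hgt : (PySem.List.index? pvOrder b).getD 0 < (PySem.List.index? pvOrder a).getD 0 := by
            omega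
          rw [if_neg he, if_neg hl, if_neg (by exact_mod_cast hl), if_pos (by exact_mod_cast hgt)]
          simp

-- A's truthiness of compareHands equals B's key comparison, for in-domain hands
lemma truthy_eq (cards hand : String)
    (hlen : hand.toList.length = cards.toList.length)
    (hc : ∀ c ∈ cards.toList, c ∈ pvOrder) (hh : ∀ c ∈ hand.toList, c ∈ pvOrder) :
    ((compareHands cards hand).getD 0 ≠ 0) ↔ pyListLt (keyB cards) (keyB hand) = true := by
  rw [compareHands, compareHandsAux_eq_cmpL _ _ hlen 0]
  simp only [List.drop_zero]
  exact cmpL_eq_pyListLt _ _ hlen hc hh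

-- A's scan inserts at the first index whose hand strictly beats fails, i.e. at findIdx?
lemma insertLoop_eq (cards : String) (tup : String × Int) (l : List (String × Int))
    (hp : ∀ h ∈ l, ((compareHands cards h.1).getD 0 ≠ 0) ↔
        pyListLt (keyB cards) (keyB h.1) = true) :
    insertLoopA cards tup l =
      (l.take ((l.findIdx? (fun hand => pyListLt (keyB cards) (keyB hand.1))).getD l.length) ++
        tup :: l.drop ((l.findIdx? (fun hand => pyListLt (keyB cards) (keyB hand.1))).getD l.length)) := by
  induction l with
  | nil => simp [insertLoopA, List.findIdx?_nil]
  | cons h t ih =>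
    rw [insertLoopA]
    by_cases ht : pyListLt (keyB cards) (keyB h.1) = true
    · rw [if_pos ((hp h (by simp)).2 ht)]
      rw [List.findIdx?_cons, ht]
      simp
    · rw [if_neg (by intro hc; exact ht ((hp h (by simp)).1 hc))]
      rw [List.findIdx?_cons]
      simp only [ht]
      rw [ih (fun x hx => hp x (by simp [hx]))]
      cases hfi : t.findIdx? (fun hand => pyListLt (keyB cards) (keyB hand.1)) with
      | none => simp [List.take_succ_cons, List.drop_succ_cons]
      | some i => simp [List.take_succ_cons, List.drop_succ_cons]

lemma insert_eq_take_drop (l : List (String × Int)) (tup : String × Int) (i : Nat)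
    (hle : i ≤ l.length) :
    PySem.List.insert l (i : Int) tup = l.take i ++ tup :: l.drop i :=
  PySem.List.insert_natCast l i tup hle

-- the spec-side comparator agrees with B's key comparison on in-domain hands
lemma rank_eq (c : Char) (hc : c ∈ pvOrder) :
    (pvRank.get? c).getD 0 = (rankOf c : Int) := by
  fin_cases hc <;> decide

lemma handBeats_eq_pyListLt (cards hand : String)
    (hlen : hand.toList.length = cards.toList.length)
    (hc : ∀ c ∈ cards.toList, c ∈ pvOrder) (hh : ∀ c ∈ hand.toList, c ∈ pvOrder) :
    handBeats cards hand = pyListLt (keyB cards) (keyB hand) := by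
  unfold handBeats keyB
  revert hlen hc hh
  generalize cards.toList = l1
  generalize hand.toList = l2
  intro hlen hc hh
  induction l1 generalizing l2 with
  | nil =>
    cases l2 with
    | nil => rfl
    | cons b bs => simp at hlen
  | cons a as ih =>
    cases l2 with
    | nil => simp at hlen
    | cons b bs =>
      have hra := rank_eq a (hc a (by simp))
      have hrb := rank_eq b (hh b (by simp))
      rw [List.map_cons, List.map_cons, beatsL, pyListLt, hra, hrb]
      by_cases h1 : rankOf a < rankOf b
      · rw [if_pos h1, if_pos (show ((rankOf a : Int) < rankOf b) by exact_mod_cast h1)]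
      · rw [if_neg h1, if_neg (show ¬((rankOf a : Int) < rankOf b) by exact_mod_cast h1)]
        by_cases h2 : rankOf b < rankOf a
        · rw [if_pos h2, if_pos (show ((rankOf b : Int) < rankOf a) by exact_mod_cast h2)]
        · rw [if_neg h2, if_neg (show ¬((rankOf b : Int) < rankOf a) by exact_mod_cast h2)]
          exact ih bs (by simpa using hlen) (fun c hcm => hc c (by simp [hcm]))
            (fun c hcm => hh c (by simp [hcm]))

-- characterization of (findIdx? p).getD length: elements before it fail p, it satisfies p
lemma findIdx?_getD_char {α : Type} (p : α → Bool) (l : List α) :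
    ((l.findIdx? p).getD l.length ≤ l.length) ∧
      (∀ j (hj : j < l.length), j < (l.findIdx? p).getD l.length → p l[j] = false) ∧
      (∀ hj : (l.findIdx? p).getD l.length < l.length,
        p (l[(l.findIdx? p).getD l.length]'hj) = true) := by
  induction l with
  | nil =>
    refine ⟨by simp [List.findIdx?_nil], ?_, ?_⟩
    · intro j hj; simp at hj
    · intro hj; simp [List.findIdx?_nil] at hj
  | cons h tl ih =>
    obtain ⟨ih1, ih2, ih3⟩ := ih
    rw [List.findIdx?_cons]
    by_cases hph : p h = true
    · rw [if_pos hph]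
      refine ⟨by simp, ?_, ?_⟩
      · intro j hj hlt; simp at hlt
      · intro hj; simpa using hph
    · rw [if_neg hph]
      have hphf : p h = false := by simpa using hph
      cases hfi : tl.findIdx? p with
      | none =>
        rw [hfi] at ih1 ih2 ih3
        simp only [Option.map_none, Option.getD_none] at ih1 ih2 ih3 ⊢
        refine ⟨by simp, ?_, ?_⟩
        · intro j hj hlt
          cases j with
          | zero => simpa using hphf
          | succ k =>
            simp only [List.length_cons] at hlt ⊢
            simp only [List.getElem_cons_succ]
            exact ih2 k (by omega) (by omega)
        · intro hj; simp at hj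
      | some i =>
        rw [hfi] at ih1 ih2 ih3
        simp only [Option.map_some, Option.getD_some] at ih1 ih2 ih3 ⊢
        refine ⟨by simp; omega, ?_, ?_⟩
        · intro j hj hlt
          cases j with
          | zero => simpa using hphf
          | succ k =>
            simp only [List.getElem_cons_succ]
            exact ih2 k (by simpa using hj) (by omega)
        · intro hj
          simp only [List.getElem_cons_succ]
          exact ih3 (by simpa using Nat.lt_of_succ_lt_succ hj)

-- binary search over keys sorted enough that `pyListLt x ·` is upward closed lands on t
lemma bisect_eq (keys : List (List Int)) (x : List Int) (t : Nat)
    (H : ∀ j (hj : j < keys.length), (pyListLt x keys[j] = true ↔ t ≤ j)) :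
    ∀ n lo hi, hi - lo ≤ n → lo ≤ t → t ≤ hi → hi ≤ keys.length →
      bisectAux keys x lo hi = t := by
  intro n
  induction n with
  | zero =>
    intro lo hi hn hlo hhi hlen
    rw [bisectAux, dif_neg (by omega)]
    omega
  | succ n ih =>
    intro lo hi hn hlo hhi hlen
    rw [bisectAux]
    by_cases hlh : lo < hi
    · rw [dif_pos hlh]
      have hm1 : lo ≤ (lo + hi) / 2 := by omega
      have hm2 : (lo + hi) / 2 < hi := by omega
      have hmlen : (lo + hi) / 2 < keys.length := by omega
      show (if pyListLt x ((keys[(lo + hi) / 2]?).getD []) then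
          bisectAux keys x lo ((lo + hi) / 2)
        else bisectAux keys x ((lo + hi) / 2 + 1) hi) = t
      rw [List.getElem?_eq_getElem hmlen]
      simp only [Option.getD_some]
      by_cases hP : pyListLt x (keys[(lo + hi) / 2]'hmlen) = true
      · have htle : t ≤ (lo + hi) / 2 := (H _ hmlen).1 hP
        rw [if_pos hP]
        exact ih lo ((lo + hi) / 2) (by omega) hlo htle (by omega)
      · have htgt : (lo + hi) / 2 < t := by
          by_contra hc
          exact hP ((H _ hmlen).2 (by omega))
        rw [if_neg hP]
        exact ih ((lo + hi) / 2 + 1) hi (by omega) (by omega) hhi hlen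
    · rw [dif_neg hlh]; omega

-- ===== VERDICT (by name: the statement is the Claim_ definition above) =====
theorem insertList_spec : Claim_equal_insertList := by
  intro list tup _hdom hpre
  obtain ⟨hcards, hlist, hsorted⟩ := hpre
  unfold Spec_insertList insertList insertList_alt
  have hcmem : ∀ c ∈ tup.1.toList, c ∈ pvOrder := by
    intro c hc
    have := List.all_eq_true.1 hcards c hc
    simpa [List.contains_iff_mem] using this
  have hp : ∀ h ∈ list, ((compareHands tup.1 h.1).getD 0 ≠ 0) ↔
      pyListLt (keyB tup.1) (keyB h.1) = true := by
    intro h hh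
    obtain ⟨hl, hall⟩ := hlist h hh
    refine truthy_eq tup.1 h.1 hl hcmem ?_
    intro c hc
    have := List.all_eq_true.1 hall c hc
    simpa [List.contains_iff_mem] using this
  have hkslen : (list.map (fun p => keyB p.1)).length = list.length := by simp
  obtain ⟨hc1, hc2, hc3⟩ :=
    findIdx?_getD_char (fun k => pyListLt (keyB tup.1) k) (list.map (fun p => keyB p.1))
  have hup : ∀ i j (hi : i < list.length) (hj : j < list.length), i < j →
      pyListLt (keyB tup.1) (keyB (list[i]'hi).1) = true →
      pyListLt (keyB tup.1) (keyB (list[j]'hj).1) = true := by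
    intro i j hi hj hij hPi
    have hbe : ∀ k (hk : k < list.length),
        handBeats tup.1 (list[k]'hk).1 = pyListLt (keyB tup.1) (keyB (list[k]'hk).1) := by
      intro k hk
      obtain ⟨hl, hall⟩ := hlist (list[k]'hk) (by exact List.getElem_mem hk)
      refine handBeats_eq_pyListLt tup.1 (list[k]'hk).1 hl hcmem ?_
      intro c hcm
      have := List.all_eq_true.1 hall c hcm
      simpa [List.contains_iff_mem] using this
    have := (List.pairwise_iff_getElem.1 hsorted) i j hi hj hij
    rw [hbe i hi, hbe j hj] at this
    exact this hPi
  have H : ∀ j (hj : j < (list.map (fun p => keyB p.1)).length),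
      (pyListLt (keyB tup.1) ((list.map (fun p => keyB p.1))[j]'hj) = true ↔
        ((list.map (fun p => keyB p.1)).findIdx?
          (fun k => pyListLt (keyB tup.1) k)).getD (list.map (fun p => keyB p.1)).length ≤ j) := by
    intro j hj
    constructor
    · intro hP
      by_contra hcon
      have := hc2 j hj (by omega)
      rw [hP] at this; simp at this
    · intro hle
      have htlt : ((list.map (fun p => keyB p.1)).findIdx?
          (fun k => pyListLt (keyB tup.1) k)).getD (list.map (fun p => keyB p.1)).length <
          (list.map (fun p => keyB p.1)).length := by omega
      have hPt := hc3 htlt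
      rcases Nat.eq_or_lt_of_le hle with he | hlt
      · simpa [← he] using hPt
      · have hglt : ∀ k (hk : k < (list.map (fun p => keyB p.1)).length),
            (list.map (fun p => keyB p.1))[k] = keyB (list[k]'(by simpa using hk)).1 := by
          intro k hk; simp
        rw [hglt j hj]
        rw [hglt _ (by omega)] at hPt
        exact hup _ j (by simpa using (by omega : ((list.map (fun p => keyB p.1)).findIdx?
            (fun k => pyListLt (keyB tup.1) k)).getD (list.map (fun p => keyB p.1)).length < (list.map (fun p => keyB p.1)).length))
          (by simpa using hj) hlt hPt
  have hbis : bisectAux (list.map (fun p => keyB p.1)) (keyB tup.1) 0 list.length =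
      ((list.map (fun p => keyB p.1)).findIdx?
        (fun k => pyListLt (keyB tup.1) k)).getD (list.map (fun p => keyB p.1)).length :=
    bisect_eq _ _ _ H list.length 0 list.length (by omega) (by omega) (by omega) (by omega)
  have hfmap : ((list.map (fun p => keyB p.1)).findIdx?
        (fun k => pyListLt (keyB tup.1) k)).getD (list.map (fun p => keyB p.1)).length =
      (list.findIdx? (fun hand => pyListLt (keyB tup.1) (keyB hand.1))).getD list.length := by
    rw [List.findIdx?_map, hkslen]; rfl
  have hTle : (list.findIdx? (fun hand => pyListLt (keyB tup.1) (keyB hand.1))).getD list.length ≤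
      list.length := by rw [← hfmap]; omega
  show (if list.isEmpty = true then tup :: list else insertLoopA tup.1 tup list) =
      PySem.List.insert list
        (Int.ofNat (bisectAux (list.map (fun p => keyB p.1)) (keyB tup.1) 0 list.length)) tup
  rw [hbis, hfmap]
  cases list with
  | nil =>
    have h0 : ((List.findIdx? (fun hand => pyListLt (keyB tup.1) (keyB hand.1))
        ([] : List (String × Int))).getD ([] : List (String × Int)).length) = 0 := by
      simp [List.findIdx?_nil]
    rw [h0]
    simp only [List.isEmpty_nil, if_true, Int.ofNat_eq_natCast]
    rw [insert_eq_take_drop [] tup 0 (by simp)]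
    simp
  | cons a as =>
    simp only [List.isEmpty_cons, if_false, Bool.false_eq_true, Int.ofNat_eq_natCast]
    rw [insertLoop_eq tup.1 tup (a :: as) hp]
    rw [insert_eq_take_drop _ _ _ hTle]
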